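-- pv_equiv track=rewrite | github.com/zensgit/cad-ml-platform | src/core/ocr/providers/paddle.py | _normalize_paddle_kwargs
-- ===== SOURCE A (Python) =====
-- def _normalize_paddle_kwargs(kwargs: dict) -> dict:
--     if not kwargs:
--         return {}
--     mapped = dict(kwargs)
--     alias_map = {
--         "use_angle_cls": "use_textline_orientation",
--         "det_db_box_thresh": "text_det_box_thresh",
--         "det_db_unclip_ratio": "text_det_unclip_ratio",
--         "det_db_thresh": "text_det_thresh",
--         "det_db_limit_side_len": "text_det_limit_side_len",
--         "det_db_limit_type": "text_det_limit_type",
--     }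
--     for old_key, new_key in alias_map.items():
--         if old_key in mapped and new_key not in mapped:
--             mapped[new_key] = mapped.pop(old_key)
--         elif old_key in mapped:
--             mapped.pop(old_key, None)
--     return mapped
-- ===== SOURCE B (Python) =====
-- _ALIASES = (
--     ("use_angle_cls", "use_textline_orientation"),
--     ("det_db_box_thresh", "text_det_box_thresh"),
--     ("det_db_unclip_ratio", "text_det_unclip_ratio"),
--     ("det_db_thresh", "text_det_thresh"),
--     ("det_db_limit_side_len", "text_det_limit_side_len"),
--     ("det_db_limit_type", "text_det_limit_type"),
-- )
--
--
-- def _rename_all(d, aliases):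
--     """Recursively apply one alias at a time, rebuilding a fresh dict per step."""
--     if not aliases:
--         return d
--     (old, new), rest = aliases[0], aliases[1:]
--     if old not in d:
--         return _rename_all(d, rest)
--     without_old = {k: v for k, v in d.items() if k != old}
--     if new in d:
--         return _rename_all(without_old, rest)
--     return _rename_all({**without_old, new: d[old]}, rest)
--
--
-- def _normalize_paddle_kwargs(kwargs: dict) -> dict:
--     if not kwargs:
--         return {}
--     return _rename_all(dict(kwargs), _ALIASES)
-- ===== Notes on version B (the rewrite author's own statement) =====
-- stated objective: alternative
-- what changed: B replaces A's imperative loop that mutates a copied dict with pop/insert by a recursive helper over the alias list that rebuilds a fresh dict (comprehension + unpacking) at each renaming step.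
import Mathlib
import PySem

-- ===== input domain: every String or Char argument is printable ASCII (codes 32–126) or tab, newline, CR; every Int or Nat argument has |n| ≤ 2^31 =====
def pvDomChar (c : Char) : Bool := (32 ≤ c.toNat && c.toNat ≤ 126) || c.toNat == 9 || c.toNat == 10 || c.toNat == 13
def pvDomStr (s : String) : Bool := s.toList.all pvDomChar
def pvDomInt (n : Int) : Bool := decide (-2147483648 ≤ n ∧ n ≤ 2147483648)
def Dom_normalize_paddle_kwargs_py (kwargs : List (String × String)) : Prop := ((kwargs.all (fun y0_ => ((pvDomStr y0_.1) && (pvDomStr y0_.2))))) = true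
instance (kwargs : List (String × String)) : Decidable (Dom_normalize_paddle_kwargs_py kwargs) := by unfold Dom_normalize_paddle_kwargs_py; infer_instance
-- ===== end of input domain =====

-- B replaces A's imperative pass that mutates a dict copy (pop/insert per alias) with a recursion
-- over the alias list that rebuilds a fresh immutable dict at each renaming step; objective: alternative, not faster.

-- the alias table both Pythons carry as a literal
def pvAliasPairs : List (String × String) :=
  [("use_angle_cls", "use_textline_orientation"),
   ("det_db_box_thresh", "text_det_box_thresh"),
   ("det_db_unclip_ratio", "text_det_unclip_ratio"),
   ("det_db_thresh", "text_det_thresh"),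
   ("det_db_limit_side_len", "text_det_limit_side_len"),
   ("det_db_limit_type", "text_det_limit_type")]

-- ===== PORT A =====
-- loop body of A: if old in mapped and new not in mapped: mapped[new] = mapped.pop(old)
--                 elif old in mapped: mapped.pop(old, None)
def pvStepA (m : PySem.Dict String String) (p : String × String) : PySem.Dict String String :=
  if m.contains p.1 && !(m.contains p.2) then
    match m.pop? p.1 with
    | some r => r.2.insert p.2 r.1
    | none => m
  else if m.contains p.1 then
    match m.pop? p.1 with
    | some r => r.2
    | none => m
  else m

def normalize_paddle_kwargs_py (kwargs : List (String × String)) : List (String × String) :=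
  if kwargs.isEmpty then []
  else
    let mapped := PySem.Dict.ofList kwargs      -- mapped = dict(kwargs)
    (pvAliasPairs.foldl pvStepA mapped).items

-- ===== PORT B =====
-- _rename_all(d, aliases): recursion over the alias list, fresh dict per renaming step
def pvRenameAll (d : PySem.Dict String String) : List (String × String) → PySem.Dict String String
  | [] => d
  | p :: rest =>
    if !(d.contains p.1) then pvRenameAll d rest
    else
      -- without_old = {k: v for k, v in d.items() if k != old}
      let without_old : PySem.Dict String String :=
        PySem.Dict.mk (d.items.filter (fun q => !(q.1 == p.1)))
      if d.contains p.2 then pvRenameAll without_old rest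
      else pvRenameAll (without_old.insert p.2 (d.getD p.1 "")) rest   -- {**without_old, new: d[old]}

def normalize_paddle_kwargs_py_alt (kwargs : List (String × String)) : List (String × String) :=
  if kwargs.isEmpty then []
  else (pvRenameAll (PySem.Dict.ofList kwargs) pvAliasPairs).items

-- ===== PRECONDITION & SPEC =====
def Spec_normalize_paddle_kwargs_py (kwargs : List (String × String)) (out : List (String × String)) : Prop := out = normalize_paddle_kwargs_py_alt kwargs
instance (kwargs : List (String × String)) (out : List (String × String)) : Decidable (Spec_normalize_paddle_kwargs_py kwargs out) := by unfold Spec_normalize_paddle_kwargs_py; infer_instance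

-- ===== CLAIM (what is proved, stated in full; the proofs are below) =====
def Claim_equal_normalize_paddle_kwargs_py : Prop := ∀ (kwargs : List (String × String)), Dom_normalize_paddle_kwargs_py kwargs → Spec_normalize_paddle_kwargs_py kwargs (normalize_paddle_kwargs_py kwargs)

-- ===== LEMMAS AND PROOFS =====

-- each recursion step of B computes exactly A's loop-body step
theorem pvStep_agree (d : PySem.Dict String String) (p : String × String) :
    (if !(d.contains p.1) then d
     else
       let without_old : PySem.Dict String String :=
         PySem.Dict.mk (d.items.filter (fun q => !(q.1 == p.1)))
       if d.contains p.2 then without_old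
       else without_old.insert p.2 (d.getD p.1 "")) = pvStepA d p := by
  by_cases c1 : d.contains p.1 = true
  · obtain ⟨v, hval⟩ : ∃ v, d.get? p.1 = some v := by
      rw [PySem.Dict.contains_eq_isSome_get?] at c1
      exact Option.isSome_iff_exists.mp c1
    have hgD : d.getD p.1 "" = v := by simp [PySem.Dict.getD, hval]
    by_cases c2 : d.contains p.2 = true
    · simp [pvStepA, c1, c2, PySem.Dict.pop?, PySem.Dict.erase, hval]
    · simp [pvStepA, c1, c2, PySem.Dict.pop?, PySem.Dict.erase, hval, hgD]
  · simp [pvStepA, c1]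

theorem pvRenameAll_eq_foldl (l : List (String × String)) :
    ∀ d : PySem.Dict String String, pvRenameAll d l = l.foldl pvStepA d := by
  induction l with
  | nil => intro d; rfl
  | cons p rest ih =>
    intro d
    rw [List.foldl_cons, ← pvStep_agree d p]
    by_cases c1 : d.contains p.1 = true
    · by_cases c2 : d.contains p.2 = true
      · simp only [pvRenameAll, c1, c2]
        simp [ih]
      · simp only [pvRenameAll, c1, c2]
        simp [ih]
    · simp only [pvRenameAll, c1]
      simp [ih]

-- ===== VERDICT (by name: the statement is the Claim_ definition above) =====
theorem normalize_paddle_kwargs_py_spec : Claim_equal_normalize_paddle_kwargs_py := by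
  intro kwargs _
  unfold Spec_normalize_paddle_kwargs_py
  unfold normalize_paddle_kwargs_py normalize_paddle_kwargs_py_alt
  by_cases he : kwargs.isEmpty
  · simp [he]
  · simp [he, pvRenameAll_eq_foldl]
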